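-- pv_equiv track=rewrite | github.com/VetCoders/vibecrafted | scripts/vetcoders_install.py | _strip_rc_entry
-- ===== SOURCE A (Python) =====
-- from typing import Dict, List, Optional, Sequence, Set, Tuple
--
-- def _strip_rc_entry(
--     content: str, line: str, comment: Optional[str] = None
-- ) -> Tuple[str, int]:
--     raw_lines = content.splitlines()
--     kept: List[str] = []
--     removed = 0
--     idx = 0
--
--     while idx < len(raw_lines):
--         current = raw_lines[idx]
--         stripped = current.strip()
--         if comment and stripped == f"# {comment}":
--             next_idx = idx + 1
--             # allow empty lines in between comment and line
--             while next_idx < len(raw_lines) and not raw_lines[next_idx].strip():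
--                 next_idx += 1
--             if next_idx < len(raw_lines) and raw_lines[next_idx].strip() == line:
--                 removed += next_idx - idx + 1
--                 idx = next_idx + 1
--                 continue
--         if stripped == line:
--             removed += 1
--             idx += 1
--             continue
--         kept.append(current)
--         idx += 1
--
--     rebuilt = "\n".join(kept)
--     if content.endswith("\n"):
--         rebuilt += "\n"
--     return rebuilt, removed
-- ===== SOURCE B (Python) =====
-- from typing import Optional, Tuple
--
-- def _strip_rc_entry(
--     content: str, line: str, comment: Optional[str] = None
-- ) -> Tuple[str, int]:
--     rest = content.splitlines()
--     n = len(rest)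
--     kept = []
--     while rest:
--         cur, rest = rest[0], rest[1:]
--         if comment and cur.strip() == "# " + comment:
--             k = next((i for i, l in enumerate(rest) if l.strip()), len(rest))
--             if k < len(rest) and rest[k].strip() == line:
--                 rest = rest[k + 1:]
--                 continue
--         if cur.strip() != line:
--             kept.append(cur)
--     rebuilt = "\n".join(kept)
--     if content.endswith("\n"):
--         rebuilt += "\n"
--     return rebuilt, n - len(kept)
-- ===== Notes on version B (the rewrite author's own statement) =====
-- stated objective: simpler
-- what changed: A scans by index with an inner index-walking blank-skip loop and an explicit removed counter; B consumes the work list from the front by destructuring, measures the blank span as a takeWhile-style prefix length, keeps only surviving lines, and recovers removed as n - len(kept) with no counter at all.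
import Mathlib
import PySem

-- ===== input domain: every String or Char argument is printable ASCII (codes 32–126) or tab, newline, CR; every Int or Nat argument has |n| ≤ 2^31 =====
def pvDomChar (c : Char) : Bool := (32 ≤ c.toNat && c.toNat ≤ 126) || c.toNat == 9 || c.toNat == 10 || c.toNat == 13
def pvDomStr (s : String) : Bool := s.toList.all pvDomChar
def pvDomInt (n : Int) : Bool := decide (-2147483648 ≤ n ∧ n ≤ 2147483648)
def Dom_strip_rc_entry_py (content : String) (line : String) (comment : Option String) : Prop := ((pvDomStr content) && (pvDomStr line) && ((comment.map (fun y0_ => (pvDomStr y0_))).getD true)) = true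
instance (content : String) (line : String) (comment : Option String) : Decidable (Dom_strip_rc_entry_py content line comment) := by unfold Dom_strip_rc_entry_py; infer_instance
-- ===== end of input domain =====

-- B consumes the line list from the front (destructuring + a takeWhile-style blank span),
-- keeps only surviving lines, and recovers removed = n - len(kept); simpler decomposition, same cost.

-- ===== PORT A =====
-- inner `while next_idx < len and not raw_lines[next_idx].strip(): next_idx += 1`
def aSkipBlanks (raw : List String) (j : Nat) : Nat :=
  if h : j < raw.length then
    if PySem.Str.strip raw[j] = "" then aSkipBlanks raw (j + 1) else j
  else j
termination_by raw.length - j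

theorem le_aSkipBlanks (raw : List String) (j : Nat) : j ≤ aSkipBlanks raw j := by
  rw [aSkipBlanks]
  split_ifs with h1 h2
  · exact le_trans (Nat.le_succ j) (le_aSkipBlanks raw (j + 1))
  · exact le_refl j
  · exact le_refl j
termination_by raw.length - j

-- the comment-block look-ahead of A: `some nj` = the matching line's index when the block applies
def aBlockEnd (raw : List String) (line : String) (comment : Option String) (idx : Nat)
    (stripped : String) : Option Nat :=
  match comment with
  | none => none
  | some c =>
    if c ≠ "" ∧ stripped = "# " ++ c then
      let nj := aSkipBlanks raw (idx + 1)
      if _h : nj < raw.length then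
        if PySem.Str.strip raw[nj] = line then some nj else none
      else none
    else none

theorem aBlockEnd_lt {raw : List String} {line : String} {comment : Option String} {idx : Nat}
    {stripped : String} {nj : Nat} (h : aBlockEnd raw line comment idx stripped = some nj) :
    idx < nj ∧ nj < raw.length := by
  unfold aBlockEnd at h
  cases comment with
  | none => simp at h
  | some c =>
    simp only at h
    split_ifs at h with h1 h2 h3
    all_goals try simp at h
    subst h
    exact ⟨Nat.lt_of_lt_of_le (Nat.lt_succ_self idx) (le_aSkipBlanks raw (idx + 1)), h2⟩

-- A's main while-loop, state (idx, kept, removed)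
def aLoop (raw : List String) (line : String) (comment : Option String) (idx : Nat)
    (kept : List String) (removed : Int) : List String × Int :=
  if h : idx < raw.length then
    match hbe : aBlockEnd raw line comment idx (PySem.Str.strip raw[idx]) with
    | some nj => aLoop raw line comment (nj + 1) kept (removed + ((nj : Int) - (idx : Int) + 1))
    | none =>
      if PySem.Str.strip raw[idx] = line then
        aLoop raw line comment (idx + 1) kept (removed + 1)
      else
        aLoop raw line comment (idx + 1) (kept ++ [raw[idx]]) removed
  else (kept, removed)
termination_by raw.length - idx
decreasing_by
  · have := aBlockEnd_lt hbe; omega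
  · omega
  · omega

def strip_rc_entry_py (content : String) (line : String) (comment : Option String) : String × Int :=
  let raw := PySem.Str.splitlines content
  let r := aLoop raw line comment 0 [] 0
  let rebuilt := PySem.Str.join "\n" r.1
  (if PySem.Str.endswith content "\n" then rebuilt ++ "\n" else rebuilt, r.2)

-- ===== PORT B =====
-- `if comment and cur.strip() == "# " + comment: k = next(...); if k < len(rest) and rest[k].strip() == line`
-- `some k` = the blank span length when the comment block applies and consumes cur plus rest[0..k]
def bConsume (line : String) (comment : Option String) (cur : String) (rest : List String) : Option Nat :=
  match comment with
  | none => none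
  | some c =>
    if c ≠ "" ∧ PySem.Str.strip cur = "# " ++ c then
      let k := (rest.takeWhile (fun l => PySem.Str.strip l == "")).length
      if _h : k < rest.length then
        if PySem.Str.strip rest[k] = line then some k else none
      else none
    else none

-- `while rest: cur, rest = rest[0], rest[1:] ...` as structural recursion on the work list
def bGo (line : String) (comment : Option String) : List String → List String → List String
  | [], kept => kept
  | cur :: rest, kept =>
    match hc : bConsume line comment cur rest with
    | some k => bGo line comment (rest.drop (k + 1)) kept
    | none =>
      if PySem.Str.strip cur ≠ line then bGo line comment rest (kept ++ [cur])
      else bGo line comment rest kept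
termination_by rest _ => rest.length
decreasing_by
  all_goals simp

def strip_rc_entry_py_alt (content : String) (line : String) (comment : Option String) : String × Int :=
  let raw := PySem.Str.splitlines content
  let kept := bGo line comment raw []
  let rebuilt := PySem.Str.join "\n" kept
  (if PySem.Str.endswith content "\n" then rebuilt ++ "\n" else rebuilt,
   (raw.length : Int) - (kept.length : Int))

-- ===== PRECONDITION & SPEC =====
def Spec_strip_rc_entry_py (content : String) (line : String) (comment : Option String) (out : String × Int) : Prop := out = strip_rc_entry_py_alt content line comment
instance (content : String) (line : String) (comment : Option String) (out : String × Int) : Decidable (Spec_strip_rc_entry_py content line comment out) := by unfold Spec_strip_rc_entry_py; infer_instance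

-- ===== CLAIM (what is proved, stated in full; the proofs are below) =====
def Claim_equal_strip_rc_entry_py : Prop := ∀ (content : String) (line : String) (comment : Option String), Dom_strip_rc_entry_py content line comment → Spec_strip_rc_entry_py content line comment (strip_rc_entry_py content line comment)

-- ===== LEMMAS AND PROOFS =====

theorem bConsume_lt {line : String} {comment : Option String} {cur : String} {rest : List String}
    {k : Nat} (h : bConsume line comment cur rest = some k) : k < rest.length := by
  unfold bConsume at h
  cases comment with
  | none => simp at h
  | some c =>
    dsimp only at h
    split_ifs at h with h1 h2 h3
    all_goals simp_all
    omega

-- step equations, extracted so the dependent matches never have to be rewritten in place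
theorem bGo_cons_some {line : String} {comment : Option String} {cur : String}
    {rest kept : List String} {k : Nat} (hc : bConsume line comment cur rest = some k) :
    bGo line comment (cur :: rest) kept = bGo line comment (rest.drop (k + 1)) kept := by
  rw [bGo.eq_def]
  dsimp only
  split <;> simp_all

theorem bGo_cons_none {line : String} {comment : Option String} {cur : String}
    {rest kept : List String} (hc : bConsume line comment cur rest = none) :
    bGo line comment (cur :: rest) kept =
      if PySem.Str.strip cur = line then bGo line comment rest kept
      else bGo line comment rest (kept ++ [cur]) := by
  rw [bGo.eq_def]
  dsimp only
  split <;> simp_all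

theorem aLoop_step_some {raw : List String} {line : String} {comment : Option String} {idx : Nat}
    {kept : List String} {removed : Int} {nj : Nat} (h : idx < raw.length)
    (hbe : aBlockEnd raw line comment idx (PySem.Str.strip raw[idx]) = some nj) :
    aLoop raw line comment idx kept removed =
      aLoop raw line comment (nj + 1) kept (removed + ((nj : Int) - (idx : Int) + 1)) := by
  rw [aLoop, dif_pos h]
  split <;> simp_all

theorem aLoop_step_none {raw : List String} {line : String} {comment : Option String} {idx : Nat}
    {kept : List String} {removed : Int} (h : idx < raw.length)
    (hbe : aBlockEnd raw line comment idx (PySem.Str.strip raw[idx]) = none) :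
    aLoop raw line comment idx kept removed =
      if PySem.Str.strip raw[idx] = line then
        aLoop raw line comment (idx + 1) kept (removed + 1)
      else aLoop raw line comment (idx + 1) (kept ++ [raw[idx]]) removed := by
  rw [aLoop, dif_pos h]
  split <;> simp_all

-- A's blank-skipping index loop = index + B's takeWhile span length
theorem aSkipBlanks_eq_takeWhile (raw : List String) (j : Nat) :
    aSkipBlanks raw j = j + ((raw.drop j).takeWhile (fun l => PySem.Str.strip l == "")).length := by
  rw [aSkipBlanks]
  by_cases h : j < raw.length
  · rw [List.drop_eq_getElem_cons h, List.takeWhile_cons]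
    by_cases hb : PySem.Str.strip raw[j] = ""
    · rw [dif_pos h, if_pos hb, aSkipBlanks_eq_takeWhile raw (j + 1)]
      simp [hb]
      omega
    · rw [dif_pos h, if_neg hb]
      simp [hb]
  · rw [dif_neg h, List.drop_eq_nil_of_le (by omega)]
    simp
termination_by raw.length - j

-- A's look-ahead on the array/index view = B's look-ahead on the suffix view
theorem aBlockEnd_eq_bConsume (raw : List String) (line : String) (comment : Option String)
    (idx : Nat) (cur : String) :
    aBlockEnd raw line comment idx (PySem.Str.strip cur) =
      (bConsume line comment cur (raw.drop (idx + 1))).map (fun k => idx + 1 + k) := by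
  unfold aBlockEnd bConsume
  cases comment with
  | none => rfl
  | some c =>
    dsimp only
    by_cases h1 : c ≠ "" ∧ PySem.Str.strip cur = "# " ++ c
    · rw [if_pos h1, if_pos h1]
      set k := ((raw.drop (idx + 1)).takeWhile (fun l => PySem.Str.strip l == "")).length with hk
      have hskip : aSkipBlanks raw (idx + 1) = idx + 1 + k := by
        rw [aSkipBlanks_eq_takeWhile raw (idx + 1)]
      have hlen : (raw.drop (idx + 1)).length = raw.length - (idx + 1) := by simp
      by_cases h2 : k < (raw.drop (idx + 1)).length
      · have hlt : idx + 1 + k < raw.length := by omega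
        have hget : (raw.drop (idx + 1))[k]'h2 = raw[idx + 1 + k]'hlt := by
          rw [List.getElem_drop]
        rw [dif_pos h2, dif_pos (by rw [hskip]; exact hlt)]
        simp only [hskip, hget]
        by_cases h3 : PySem.Str.strip (raw[idx + 1 + k]'hlt) = line
        · simp [h3]
        · simp [h3]
      · rw [dif_neg h2, dif_neg (by rw [hskip]; omega)]
        simp
    · rw [if_neg h1, if_neg h1]
      simp

-- the main invariant: A's loop at index idx behaves like B's list recursion on the suffix,
-- with removed recoverable from the kept-list growth
theorem aLoop_eq_bGo (raw : List String) (line : String) (comment : Option String) :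
    ∀ (idx : Nat) (kept : List String) (removed : Int), idx ≤ raw.length →
      aLoop raw line comment idx kept removed =
        (bGo line comment (raw.drop idx) kept,
         removed + ((raw.length - idx : Nat) : Int)
           - (((bGo line comment (raw.drop idx) kept).length : Int) - (kept.length : Int))) := by
  intro idx kept removed hle
  by_cases h : idx < raw.length
  · have hcons : raw.drop idx = raw[idx] :: raw.drop (idx + 1) := List.drop_eq_getElem_cons h
    have hlen : (raw.drop (idx + 1)).length = raw.length - (idx + 1) := by simp
    cases hcc : bConsume line comment raw[idx] (raw.drop (idx + 1)) with
    | some k =>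
      have hklen : k < (raw.drop (idx + 1)).length := bConsume_lt hcc
      have hbe : aBlockEnd raw line comment idx (PySem.Str.strip raw[idx]) = some (idx + 1 + k) := by
        rw [aBlockEnd_eq_bConsume, hcc]; rfl
      have hdropdrop : (raw.drop (idx + 1)).drop (k + 1) = raw.drop (idx + 1 + k + 1) := by
        rw [List.drop_drop]; congr 1
      rw [aLoop_step_some h hbe, hcons, bGo_cons_some hcc, hdropdrop,
        aLoop_eq_bGo raw line comment (idx + 1 + k + 1) kept
          (removed + ((↑(idx + 1 + k) : Int) - (idx : Int) + 1)) (by omega)]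
      congr 1
      omega
    | none =>
      have hbe : aBlockEnd raw line comment idx (PySem.Str.strip raw[idx]) = none := by
        rw [aBlockEnd_eq_bConsume, hcc]; rfl
      rw [aLoop_step_none h hbe, hcons, bGo_cons_none hcc]
      by_cases hl : PySem.Str.strip raw[idx] = line
      · rw [if_pos hl, if_pos hl,
          aLoop_eq_bGo raw line comment (idx + 1) kept (removed + 1) (by omega)]
        congr 1
        omega
      · rw [if_neg hl, if_neg hl,
          aLoop_eq_bGo raw line comment (idx + 1) (kept ++ [raw[idx]]) removed (by omega)]
        congr 1
        simp only [List.length_append, List.length_cons, List.length_nil]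
        omega
  · have hidx : idx = raw.length := by omega
    rw [aLoop, dif_neg h, List.drop_eq_nil_of_le (by omega), bGo.eq_def]
    simp [hidx]
termination_by idx _ _ _ => raw.length - idx
decreasing_by
  all_goals omega

-- ===== VERDICT (by name: the statement is the Claim_ definition above) =====
theorem strip_rc_entry_py_spec : Claim_equal_strip_rc_entry_py := by
  intro content line comment _
  unfold Spec_strip_rc_entry_py strip_rc_entry_py strip_rc_entry_py_alt
  dsimp only
  rw [aLoop_eq_bGo (PySem.Str.splitlines content) line comment 0 [] 0 (by omega)]
  simp
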